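-- pv_equiv track=rewrite | github.com/daniellezhang/comp10001project | project3.py | phasedout_group_3
-- ===== SOURCE A (Python) =====
-- from collections import defaultdict as dd
--
-- WILD_CARDS = ['AS', 'AH', 'AD', 'AC']
--
-- def phasedout_group_3(group):
--     '''Return 3 if the group satisfies type 3's requirement,
--     otherwise return None'''
--
--     value_count = dd(int)
--     # Check the number of cards
--     if len(group) != 4:
--         return None
--
--     # Counting values of the card set
--     for card in group:
--         if card in WILD_CARDS:
--             value_count['wild_card'] += 1
--         else:
--             value_count[card[0]] += 1
--
--     for value in value_count.copy().keys():
--         if value != 'wild_card':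
--             # 4 natural cards with same value
--             if value_count[value] == 4:
--                 return 3
--
--             # a set of at least 2 natural cards with same value
--             # + wild cards
--             elif value_count[value] >= 2 and value_count[
--                  value] + value_count['wild_card'] == 4:
--                 return 3
--     return None
-- ===== SOURCE B (Python) =====
-- WILD_CARDS = ['AS', 'AH', 'AD', 'AC']
--
-- def phasedout_group_3(group):
--     '''Return 3 if the group satisfies type 3's requirement,
--     otherwise return None'''
--     if len(group) != 4:
--         return None
--     wild = sum(1 for card in group if card in WILD_CARDS)
--     values = {card[0] for card in group if card not in WILD_CARDS}
--     if len(values) == 1 and 4 - wild >= 2: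
--         return 3
--     return None
-- ===== Notes on version B (the rewrite author's own statement) =====
-- stated objective: simpler
-- what changed: Replaces the defaultdict counting plus per-value count==4 / count+wild==4 scan by a single wild count and a set of natural-card values: with exactly 4 cards the requirement holds iff all natural cards share one value and at least two of the cards are natural.
import Mathlib
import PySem

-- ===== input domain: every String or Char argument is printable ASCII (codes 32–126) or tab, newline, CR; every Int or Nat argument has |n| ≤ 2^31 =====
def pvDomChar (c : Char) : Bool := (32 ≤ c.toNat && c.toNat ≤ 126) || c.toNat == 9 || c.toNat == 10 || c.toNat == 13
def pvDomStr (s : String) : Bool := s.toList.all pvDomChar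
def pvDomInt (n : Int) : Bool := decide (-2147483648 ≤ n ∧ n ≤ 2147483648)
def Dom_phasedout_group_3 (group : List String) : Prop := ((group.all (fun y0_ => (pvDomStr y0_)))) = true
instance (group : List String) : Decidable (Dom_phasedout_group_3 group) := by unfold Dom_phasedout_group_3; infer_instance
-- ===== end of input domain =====

-- B replaces A's defaultdict counting and per-value arithmetic scan by one wild count
-- plus a set of the natural cards' values (objective: simpler).

-- ===== PORT A =====
def pvWILD : List String := ["AS", "AH", "AD", "AC"]

-- card[0]: exact (pyGet?) wherever the Python does not raise; the ' ' default is only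
-- reached on an empty non-wild card, where Python raises IndexError (outside Pre_).
def pvHead (s : String) : Char := (PySem.Str.pyGet? s 0).getD ' '

-- the second loop of A, with its early 'return 3'
def pvScanA (vc : PySem.Dict String Int) : List String → Option Int
  | [] => none
  | k :: rest =>
    if k ≠ "wild_card" then
      if vc.getD k 0 = 4 then some 3
      else if vc.getD k 0 ≥ 2 ∧ vc.getD k 0 + vc.getD "wild_card" 0 = 4 then some 3
      else pvScanA vc rest
    else pvScanA vc rest

def phasedout_group_3 (group : List String) : Option Int :=
  if group.length ≠ 4 then none
  else
    let vc : PySem.Dict String Int :=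
      group.foldl (fun d card =>
        if pvWILD.contains card then d.modify "wild_card" 0 (· + 1)
        else d.modify (String.ofList [pvHead card]) 0 (· + 1)) PySem.Dict.empty
    pvScanA vc vc.keys

-- ===== PORT B =====
def phasedout_group_3_alt (group : List String) : Option Int :=
  if group.length ≠ 4 then none
  else
    let wild : Int := group.foldl (fun n card => if pvWILD.contains card then n + 1 else n) 0
    let values : PySem.Set Char :=
      group.foldl (fun s card => if pvWILD.contains card then s else PySem.Set.add s (pvHead card))
        PySem.Set.empty
    if values.length = 1 ∧ 4 - wild ≥ 2 then some 3 else none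

-- ===== PRECONDITION & SPEC =====
-- Pre_ excludes only groups of exactly 4 cards containing the empty string: there card[0]
-- raises IndexError in both A and B ('' is not a wild card).
def Pre_phasedout_group_3 (group : List String) : Prop :=
  group.length = 4 → "" ∉ group
instance (group : List String) : Decidable (Pre_phasedout_group_3 group) := by
  unfold Pre_phasedout_group_3; infer_instance

def pvWitness_phasedout_group_3 : List String := ["2S", "2D", "AS", "AH"]

def Spec_phasedout_group_3 (group : List String) (out : Option Int) : Prop := out = phasedout_group_3_alt group
instance (group : List String) (out : Option Int) : Decidable (Spec_phasedout_group_3 group out) := by unfold Spec_phasedout_group_3; infer_instance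

-- ===== CLAIM (what is proved, stated in full; the proofs are below) =====
def Claim_equal_phasedout_group_3 : Prop := ∀ (group : List String), Dom_phasedout_group_3 group → Pre_phasedout_group_3 group → Spec_phasedout_group_3 group (phasedout_group_3 group)

-- ===== LEMMAS AND PROOFS =====

-- the key A files each card under
def pvKey (c : String) : String :=
  if pvWILD.contains c then "wild_card" else String.ofList [pvHead c]

theorem pv_singleton_ne_wild (h : Char) : String.ofList [h] ≠ "wild_card" := by
  simp [← String.toList_inj]

-- A's counting loop is Counter(map key group)
theorem pv_foldA_eq_counter (group : List String) :
    group.foldl (fun d card =>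
        if pvWILD.contains card then d.modify "wild_card" 0 (· + 1)
        else d.modify (String.ofList [pvHead card]) 0 (· + 1)) PySem.Dict.empty
      = PySem.Dict.counter (group.map pvKey) := by
  rw [PySem.Dict.counter_eq_foldl, List.foldl_map]
  congr 1
  funext d c
  by_cases h : c ∈ pvWILD <;> simp [pvKey, h]

-- A's scan loop returns 3 iff some key qualifies
theorem pvScanA_eq (vc : PySem.Dict String Int) (ks : List String) :
    pvScanA vc ks =
      (if ∃ k ∈ ks, k ≠ "wild_card" ∧
          (vc.getD k 0 = 4 ∨ (vc.getD k 0 ≥ 2 ∧ vc.getD k 0 + vc.getD "wild_card" 0 = 4))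
        then some 3 else none) := by
  induction ks with
  | nil => simp [pvScanA]
  | cons k rest ih =>
    simp only [pvScanA, ih]
    by_cases hw : k = "wild_card"
    · subst hw; simp
    · by_cases hA : vc.getD k 0 = 4
      · simp [hw, hA]
      · by_cases hB : vc.getD k 0 ≥ 2 ∧ vc.getD k 0 + vc.getD "wild_card" 0 = 4
        · simp [hw, hA, hB]
        · simp [hw, hA, hB]

-- B's count loop, generic in the predicate
theorem pv_foldCount {α : Type} (p : α → Bool) (l : List α) (n : Int) :
    l.foldl (fun n c => if p c then n + 1 else n) n = n + (l.countP p : Int) := by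
  induction l generalizing n with
  | nil => simp
  | cons c t ih =>
    rw [List.foldl_cons, List.countP_cons]
    by_cases h : p c <;> simp only [h, if_true, if_false, Bool.false_eq_true] <;>
      rw [ih] <;> push_cast <;> ring

-- B's set-comprehension loop, generic in predicate and map
theorem pv_foldSet {α β : Type} [BEq β] (p : α → Bool) (f : α → β) (l : List α)
    (s : PySem.Set β) :
    l.foldl (fun s c => if p c then s else PySem.Set.add s (f c)) s
      = PySem.Set.update s ((l.filter (fun c => !p c)).map f) := by
  induction l generalizing s with
  | nil => simp [PySem.Set.update]
  | cons c t ih =>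
    rw [List.foldl_cons, List.filter_cons]
    by_cases h : p c <;>
      simp only [h, if_true, if_false, Bool.not_true, Bool.not_false, Bool.false_eq_true] <;>
      rw [ih] <;> simp [PySem.Set.update]

-- counts of keys in the mapped list
theorem pv_count_wild (group : List String) :
    (group.map pvKey).count "wild_card" = group.countP (fun c => pvWILD.contains c) := by
  induction group with
  | nil => simp
  | cons c t ih =>
    rw [List.map_cons, List.count_cons, List.countP_cons, ih]
    by_cases h : c ∈ pvWILD
    · have hk : pvKey c = "wild_card" := by simp [pvKey, h]
      simp [hk, h]
    · have hk : pvKey c = String.ofList [pvHead c] := by simp [pvKey, h]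
      simp [hk, h, pv_singleton_ne_wild (pvHead c)]

theorem pv_count_head (group : List String) (h : Char) :
    (group.map pvKey).count (String.ofList [h])
      = ((group.filter (fun c => !pvWILD.contains c)).map pvHead).count h := by
  induction group with
  | nil => simp
  | cons c t ih =>
    rw [List.map_cons, List.count_cons, List.filter_cons]
    by_cases hc : c ∈ pvWILD
    · have hk : pvKey c = "wild_card" := by simp [pvKey, hc]
      simp [hk, hc, ih, Ne.symm (pv_singleton_ne_wild h)]
    · have hk : pvKey c = String.ofList [pvHead c] := by simp [pvKey, hc]
      have heq : (String.ofList [pvHead c] == String.ofList [h]) = (pvHead c == h) := by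
        simp [← String.toList_inj]
      rw [hk, heq, ih]
      simp [hc, List.count_cons]

-- a set built from a list has one element iff the list is nonempty with all elements equal
theorem pv_set_len_one (l : List Char) :
    (PySem.Set.ofList l).length = 1 ↔ l ≠ [] ∧ ∀ x ∈ l, ∀ y ∈ l, x = y := by
  constructor
  · intro h1
    obtain ⟨a, ha⟩ := List.length_eq_one_iff.mp h1
    constructor
    · intro hnil; rw [hnil] at ha; simp [PySem.Set.ofList] at ha
    · intro x hx y hy
      have hx' : x ∈ PySem.Set.ofList l := by simpa [PySem.Set.mem_ofList] using hx
      have hy' : y ∈ PySem.Set.ofList l := by simpa [PySem.Set.mem_ofList] using hy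
      rw [ha] at hx' hy'
      simp at hx' hy'
      rw [hx', hy']
  · rintro ⟨hne, hall⟩
    have hnd := PySem.Set.nodup_ofList l
    match l, hne with
    | c :: t, _ =>
      have hmem : c ∈ PySem.Set.ofList (c :: t) := by
        rw [PySem.Set.mem_ofList]; simp
      have hsub : ∀ x ∈ PySem.Set.ofList (c :: t), x = c := by
        intro x hx
        have := (PySem.Set.mem_ofList _ x).mp hx
        exact hall x this c (by simp)
      rcases hset : PySem.Set.ofList (c :: t) with _ | ⟨a, _ | ⟨b, r⟩⟩
      · rw [hset] at hmem; simp at hmem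
      · simp
      · rw [hset] at hnd hsub
        have ha := hsub a (by simp)
        have hb := hsub b (by simp)
        rw [ha, hb] at hnd
        simp at hnd

-- ===== VERDICT (by name: the statement is the Claim_ definition above) =====
theorem phasedout_group_3_spec : Claim_equal_phasedout_group_3 := by
  intro group _ _
  unfold Spec_phasedout_group_3 phasedout_group_3 phasedout_group_3_alt
  by_cases h4 : group.length = 4
  · simp only [h4, ne_eq, not_true_eq_false, if_false]
    rw [pv_foldA_eq_counter, pv_foldCount, pv_foldSet, pvScanA_eq]
    have hupd : PySem.Set.update PySem.Set.empty
        ((group.filter (fun c => !pvWILD.contains c)).map pvHead)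
        = PySem.Set.ofList ((group.filter (fun c => !pvWILD.contains c)).map pvHead) := by
      rw [PySem.Set.ofList_eq_foldl]; rfl
    rw [hupd, PySem.Dict.keys_counter]
    set heads := (group.filter (fun c => !pvWILD.contains c)).map pvHead with hheads
    set w : Nat := group.countP (fun c => pvWILD.contains c) with hw
    have hlen : heads.length + w = 4 := by
      have h1 := List.length_eq_length_filter_add (l := group) (fun c => pvWILD.contains c)
      have h2 : (group.filter (fun c => pvWILD.contains c)).length = w := by
        rw [hw, List.countP_eq_length_filter]
      simp only [hheads, List.length_map]
      omega
    have hcw : ((group.map pvKey).count "wild_card" : Int) = (w : Int) := by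
      rw [pv_count_wild]
    have hiff : (∃ k ∈ PySem.Set.ofList (group.map pvKey), ¬k = "wild_card" ∧
          ((PySem.Dict.counter (group.map pvKey)).getD k 0 = 4 ∨
            ((PySem.Dict.counter (group.map pvKey)).getD k 0 ≥ 2 ∧
             (PySem.Dict.counter (group.map pvKey)).getD k 0 +
               (PySem.Dict.counter (group.map pvKey)).getD "wild_card" 0 = 4)))
        ↔ ((PySem.Set.ofList heads).length = 1 ∧ 4 - (0 + (w : Int)) ≥ 2) := by
      simp only [PySem.Set.mem_ofList, PySem.Dict.getD_counter, pv_set_len_one]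
      constructor
      · rintro ⟨k, hk, hknw, hcond⟩
        obtain ⟨c, hc, rfl⟩ := List.mem_map.mp hk
        have hcnat : pvWILD.contains c = false := by
          cases hx : pvWILD.contains c
          · rfl
          · exact absurd (by unfold pvKey; rw [hx]; simp) hknw
        have hkey : pvKey c = String.ofList [pvHead c] := by
          unfold pvKey; rw [hcnat]; simp
        rw [hkey] at hcond
        rw [pv_count_head, pv_count_wild, ← hheads, ← hw] at hcond
        have hhm : pvHead c ∈ heads := by
          rw [hheads]
          exact List.mem_map_of_mem (List.mem_filter.mpr ⟨hc, by simpa using hcnat⟩)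
        have hcle : heads.count (pvHead c) ≤ heads.length := List.count_le_length
        have hcall : heads.count (pvHead c) = heads.length := by omega
        have hall := List.count_eq_length.mp hcall
        refine ⟨⟨?_, ?_⟩, by omega⟩
        · intro hnil; rw [hnil] at hhm; simp at hhm
        · intro x hx y hy
          rw [← hall x hx, ← hall y hy]
      · rintro ⟨⟨hne, hall⟩, hge⟩
        obtain ⟨h0, hh0⟩ := List.exists_mem_of_ne_nil heads hne
        obtain ⟨cc, hcf, hch⟩ := List.mem_map.mp (by rw [hheads] at hh0; exact hh0)
        have hcmem := List.mem_filter.mp hcf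
        have hcnat : pvWILD.contains cc = false := by simpa using hcmem.2
        have hkey : pvKey cc = String.ofList [pvHead cc] := by
          unfold pvKey; rw [hcnat]; simp
        refine ⟨pvKey cc, List.mem_map_of_mem hcmem.1,
          by rw [hkey]; exact pv_singleton_ne_wild _, ?_⟩
        rw [hkey, pv_count_head, pv_count_wild, ← hheads, ← hw, hch]
        have hcall : heads.count h0 = heads.length :=
          List.count_eq_length.mpr (fun b hb => hall h0 hh0 b hb)
        right
        constructor <;> omega
    simp only [ne_eq] at hiff ⊢
    rw [if_congr hiff rfl rfl]
  · simp [h4]
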